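-- pv_equiv track=rewrite | github.com/wialex77/Koike_order_entry | step4_mapping.py | _extract_part_suffix
-- ===== SOURCE A (Python) =====
-- def _extract_part_suffix(part_number: str) -> str:
--     """
--     Extract the suffix from a part number (e.g., -1, -2, -3, -A, -B, etc.).
--
--     Args:
--         part_number: The part number to extract suffix from
--
--     Returns:
--         The suffix if found, empty string otherwise
--     """
--     if not part_number:
--         return ""
--
--     # Convert to uppercase for consistency
--     part = part_number.upper()
--
--     # Check for common suffixes
--     suffixes = ['-1', '-2', '-3', '-4', '-5', '-6', '-7', '-8', '-9',
--                '-A', '-B', '-C', '-D', '-E', '-F', '-G', '-H', '-I', '-J']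
--
--     for suffix in suffixes:
--         if part.endswith(suffix):
--             return suffix
--
--     # For internal parts, check if it ends with a single digit or letter
--     # (e.g., ZTIP103D71 -> suffix is "1")
--     if len(part) > 1:
--         last_char = part[-1]
--         if last_char.isdigit() or last_char.isalpha():
--             # For internal parts, we want the last character as suffix
--             # (e.g., ZTIP103D71 -> "1", ZTIP103D7A -> "A")
--             return last_char
--
--     return ""
-- ===== SOURCE B (Python) =====
-- def _extract_part_suffix(part_number: str) -> str:
--     """Compute the suffix LENGTH (2, 1 or 0) by classifying the tail
--     characters with ordinal range checks, then return one slice."""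
--     part = part_number.upper()
--     n = len(part)
--     k = 0
--     if n > 1:
--         c = part[-1]
--         if part[-2] == '-' and ('1' <= c <= '9' or 'A' <= c <= 'J'):
--             k = 2
--         elif c.isdigit() or c.isalpha():
--             k = 1
--     return part[n - k:]
-- ===== Notes on version B (the rewrite author's own statement) =====
-- stated objective: alternative
-- what changed: Instead of scanning A's table of 19 two-char suffix literals with endswith and returning from whichever branch fires, B computes a suffix LENGTH k in {2,1,0} by classifying the last two characters with ordinal range checks ('1'<=c<='9' or 'A'<=c<='J' after a '-') and returns the single slice part[len(part)-k:].
import Mathlib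
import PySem

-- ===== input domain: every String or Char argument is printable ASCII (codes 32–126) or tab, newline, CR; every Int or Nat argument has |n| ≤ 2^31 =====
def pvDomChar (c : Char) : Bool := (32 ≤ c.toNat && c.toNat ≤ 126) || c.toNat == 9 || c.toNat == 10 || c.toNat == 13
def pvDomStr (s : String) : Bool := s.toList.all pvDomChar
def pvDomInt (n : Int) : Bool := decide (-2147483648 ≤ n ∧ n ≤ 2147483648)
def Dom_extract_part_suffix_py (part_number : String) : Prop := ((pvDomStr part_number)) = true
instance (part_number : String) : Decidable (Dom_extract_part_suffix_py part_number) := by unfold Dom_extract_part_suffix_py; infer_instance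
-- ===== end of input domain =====

-- B computes the suffix LENGTH (2/1/0) by classifying the tail with ordinal range checks and returns one slice, instead of scanning A's table of 19 suffix literals (alternative decomposition, same cost).


-- ===== PORT A =====
-- the literal table of A's 19 candidate suffixes, as char lists
def pvSuffixes : List (List Char) :=
  [['-','1'], ['-','2'], ['-','3'], ['-','4'], ['-','5'], ['-','6'], ['-','7'], ['-','8'], ['-','9'],
   ['-','A'], ['-','B'], ['-','C'], ['-','D'], ['-','E'], ['-','F'], ['-','G'], ['-','H'], ['-','I'], ['-','J']]

def extract_part_suffix_py (part_number : String) : String :=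
  if part_number.toList = [] then ""
  else
    let part := PySem.Chars.upper part_number.toList
    -- 'for suffix in suffixes: if part.endswith(suffix): return suffix' = first match
    match pvSuffixes.find? (fun suf => PySem.Chars.endswith part suf) with
    | some suf => String.ofList suf
    | none =>
      if 1 < PySem.Chars.len part then
        let last_char := PySem.List.pyGetD part (-1) ' '   -- part[-1], in range: len > 1
        if PySem.Chars.isdigit last_char || PySem.Chars.isalpha last_char then
          String.ofList [last_char]
        else ""
      else ""

-- ===== PORT B =====
def extract_part_suffix_py_alt (part_number : String) : String :=
  let part := PySem.Chars.upper part_number.toList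
  let n := PySem.Chars.len part
  let k : Int :=
    if 1 < n then
      let c := PySem.List.pyGetD part (-1) ' '              -- part[-1], in range: n > 1
      if (PySem.List.pyGetD part (-2) ' ' == '-')           -- part[-2] == '-', in range: n > 1
          && (('1' ≤ c && c ≤ '9') || ('A' ≤ c && c ≤ 'J')) -- '1' <= c <= '9' or 'A' <= c <= 'J'
      then 2
      else if PySem.Chars.isdigit c || PySem.Chars.isalpha c then 1
      else 0
    else 0
  String.ofList (PySem.List.slice part (some (n - k)) none) -- part[n - k:]

-- ===== PRECONDITION & SPEC =====
def Spec_extract_part_suffix_py (part_number : String) (out : String) : Prop := out = extract_part_suffix_py_alt part_number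
instance (part_number : String) (out : String) : Decidable (Spec_extract_part_suffix_py part_number out) := by unfold Spec_extract_part_suffix_py; infer_instance

-- ===== CLAIM (what is proved, stated in full; the proofs are below) =====
def Claim_equal_extract_part_suffix_py : Prop := ∀ (part_number : String), Dom_extract_part_suffix_py part_number → Spec_extract_part_suffix_py part_number (extract_part_suffix_py part_number)

-- ===== LEMMAS AND PROOFS =====

-- the chars that B's ordinal range checks accept are exactly the trailing chars of A's table
lemma range_mem (c : Char) :
    (('1' ≤ c && c ≤ '9') || ('A' ≤ c && c ≤ 'J')) = true ↔
    c ∈ (['1','2','3','4','5','6','7','8','9','A','B','C','D','E','F','G','H','I','J'] : List Char) := by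
  constructor
  · intro h
    simp only [Bool.or_eq_true, Bool.and_eq_true, decide_eq_true_eq, Char.le_def,
      UInt32.le_iff_toNat_le] at h
    have hc : c = Char.ofNat c.toNat := (Char.ofNat_toNat c).symm
    have hb : c.toNat ≤ 74 := by rcases h with ⟨h1,h2⟩|⟨h1,h2⟩ <;> simp at h2 <;> omega
    have hlo : 49 ≤ c.toNat := by rcases h with ⟨h1,h2⟩|⟨h1,h2⟩ <;> simp at h1 <;> omega
    set m := c.toNat with hm
    interval_cases m <;> simp_all
  · intro h; fin_cases h <;> decide

-- A's endswith on a two-char suffix reads exactly the last two characters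
lemma endswith_pair (zs : List Char) (d c x : Char) :
    PySem.Chars.endswith (zs ++ [d, c]) ['-', x] = (d == '-' && c == x) := by
  rw [Bool.eq_iff_iff, PySem.Chars.endswith_iff]
  constructor
  · intro h
    rw [← List.reverse_prefix] at h
    simp at h
    obtain ⟨rfl, rfl⟩ := h
    simp
  · intro h
    simp at h
    rw [← List.reverse_prefix]
    simp [h]

-- a two-char suffix never matches a one-char string
lemma endswith_single (c x : Char) : PySem.Chars.endswith [c] ['-', x] = false := by
  rw [Bool.eq_false_iff, Ne, PySem.Chars.endswith_iff]
  intro h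
  have := h.length_le
  simp at this

-- the two bodies agree on any nonempty (uppercased) char list
lemma core_eq (l : List Char) (hl : l ≠ []) :
    (match pvSuffixes.find? (fun suf => PySem.Chars.endswith l suf) with
     | some suf => String.ofList suf
     | none =>
       if 1 < PySem.Chars.len l then
         if PySem.Chars.isdigit (PySem.List.pyGetD l (-1) ' ') || PySem.Chars.isalpha (PySem.List.pyGetD l (-1) ' ') then
           String.ofList [PySem.List.pyGetD l (-1) ' ']
         else ""
       else "")
    =
    (let n := PySem.Chars.len l
     let k : Int :=
       if 1 < n then
         if (PySem.List.pyGetD l (-2) ' ' == '-')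
             && (('1' ≤ PySem.List.pyGetD l (-1) ' ' && PySem.List.pyGetD l (-1) ' ' ≤ '9')
                 || ('A' ≤ PySem.List.pyGetD l (-1) ' ' && PySem.List.pyGetD l (-1) ' ' ≤ 'J'))
         then 2
         else if PySem.Chars.isdigit (PySem.List.pyGetD l (-1) ' ') || PySem.Chars.isalpha (PySem.List.pyGetD l (-1) ' ') then 1
         else 0
       else 0
     String.ofList (PySem.List.slice l (some (n - k)) none)) := by
  rcases List.eq_nil_or_concat l with rfl | ⟨ys, c, rfl⟩
  · exact absurd rfl hl
  rcases List.eq_nil_or_concat ys with rfl | ⟨zs, d, rfl⟩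
  · simp only [List.concat_eq_append, List.nil_append] at *
    have h1 : PySem.List.slice [c] (some (1:Int)) none = [] := by
      rw [PySem.List.slice_from _ (by omega)]
      simp
    simp [pvSuffixes, List.find?, endswith_single, PySem.Chars.len_eq, h1]
  · simp only [List.concat_eq_append, List.append_assoc, List.singleton_append] at *
    have h1 : PySem.List.pyGetD (zs ++ [d, c]) (-1) ' ' = c := by
      have h : zs ++ [d, c] = (zs ++ [d]) ++ [c] := by simp
      rw [h, PySem.List.pyGetD_neg_one_append_singleton]
    have h2 : PySem.List.pyGetD (zs ++ [d, c]) (-2) ' ' = d := by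
      rw [PySem.List.pyGetD_neg_ofNat _ 2 _ (by omega) (by simp)]
      simp
    have hn : PySem.Chars.len (zs ++ [d, c]) = (zs.length : Int) + 2 := by
      simp [PySem.Chars.len_eq]
    have hs2 : PySem.List.slice (zs ++ [d, c]) (some ((zs.length : Int) + 2 - 2)) none = [d, c] := by
      rw [PySem.List.slice_from _ (by omega)]
      simp
    have hs1 : PySem.List.slice (zs ++ [d, c]) (some ((zs.length : Int) + 2 - 1)) none = [c] := by
      rw [PySem.List.slice_from _ (by omega)]
      have : ((zs.length : Int) + 2 - 1).toNat = zs.length + 1 := by omega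
      rw [this]
      rw [show zs ++ [d, c] = (zs ++ [d]) ++ [c] by simp]
      rw [List.drop_append_of_le_length (by simp)]
      simp
    have hs0 : PySem.List.slice (zs ++ [d, c]) (some ((zs.length : Int) + 2)) none = [] := by
      rw [PySem.List.slice_from _ (by omega),
        show ((zs.length : Int) + 2).toNat = zs.length + 2 by omega]
      apply List.drop_eq_nil_of_le
      simp
    have hlen : (1:Int) < (zs.length:Int) + 2 := by omega
    simp only [h1, h2, hn]
    by_cases hd : d = '-'
    · subst hd
      by_cases hm : (('1' ≤ c && c ≤ '9') || ('A' ≤ c && c ≤ 'J')) = true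
      · have hmem := (range_mem c).mp hm
        fin_cases hmem <;>
          simp [pvSuffixes, List.find?, endswith_pair, hlen]
      · have hmem : c ∉ (['1','2','3','4','5','6','7','8','9','A','B','C','D','E','F','G','H','I','J'] : List Char) :=
          fun h => hm ((range_mem c).mpr h)
        simp at hmem
        have hfind : pvSuffixes.find? (fun suf => PySem.Chars.endswith (zs ++ ['-', c]) suf) = none := by
          rw [List.find?_eq_none]
          intro x hx
          fin_cases hx <;> simp [endswith_pair, hmem]
        rw [hfind]
        simp only [Bool.not_eq_true] at hm
        simp only [hlen, beq_self_eq_true, Bool.true_and, hm]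
        by_cases ha : (PySem.Chars.isdigit c || PySem.Chars.isalpha c) = true
        · simp [ha, hs1]
        · simp only [Bool.not_eq_true] at ha
          simp [ha, hs0]
    · have hfind : pvSuffixes.find? (fun suf => PySem.Chars.endswith (zs ++ [d, c]) suf) = none := by
        rw [List.find?_eq_none]
        intro x hx
        fin_cases hx <;> simp [endswith_pair, hd]
      rw [hfind]
      have hdd : (d == '-') = false := by simp [hd]
      simp only [hlen, hdd, Bool.false_and]
      by_cases ha : (PySem.Chars.isdigit c || PySem.Chars.isalpha c) = true
      · simp [ha, hs1]
      · simp only [Bool.not_eq_true] at ha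
        simp [ha, hs0]

-- ===== VERDICT (by name: the statement is the Claim_ definition above) =====
theorem extract_part_suffix_py_spec : Claim_equal_extract_part_suffix_py := by
  intro p _
  unfold Spec_extract_part_suffix_py extract_part_suffix_py extract_part_suffix_py_alt
  by_cases h : p.toList = []
  · simp [h, PySem.Chars.upper, PySem.Chars.len, PySem.List.slice]
  · simp only [if_neg h]
    exact core_eq _ (by simp [PySem.Chars.upper, h])
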